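-- pv_equiv track=rewrite | github.com/Jaeki/python_practice | chapter6.py | f14
-- ===== SOURCE A (Python) =====
-- def f14(rows, cols):
--     returnValue = []
--     for row in range(rows):
--         adjact_value = []
--         for col in range(cols):
--             adjacent_count = 0
--
--             # check above
--             if row - 1 >= 0:
--                 adjacent_count += 1
--
--                 # check below
--             if row + 1 < rows:
--                 adjacent_count += 1
--
--                 # check left
--             if col - 1 >= 0:
--                 adjacent_count += 1
--
--             # check right
--             if col + 1 < cols:
--                 adjacent_count += 1
--             adjact_value.append(adjacent_count)
--
--         returnValue.append(adjact_value)
--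
--     return returnValue
-- ===== SOURCE B (Python) =====
-- def f14(rows, cols):
--     if rows <= 0:
--         return []
--     vert = [(r > 0) + (r < rows - 1) for r in range(rows)]
--     horiz = [(c > 0) + (c < cols - 1) for c in range(cols)]
--     return [[v + h for h in horiz] for v in vert]
-- ===== Notes on version B (the rewrite author's own statement) =====
-- stated objective: simpler
-- what changed: Replaces the four per-cell positional if-guards with two precomputed 1-D contribution tables (vert per row, horiz per column) combined by a separable sum vert[r]+horiz[c].
import Mathlib
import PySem

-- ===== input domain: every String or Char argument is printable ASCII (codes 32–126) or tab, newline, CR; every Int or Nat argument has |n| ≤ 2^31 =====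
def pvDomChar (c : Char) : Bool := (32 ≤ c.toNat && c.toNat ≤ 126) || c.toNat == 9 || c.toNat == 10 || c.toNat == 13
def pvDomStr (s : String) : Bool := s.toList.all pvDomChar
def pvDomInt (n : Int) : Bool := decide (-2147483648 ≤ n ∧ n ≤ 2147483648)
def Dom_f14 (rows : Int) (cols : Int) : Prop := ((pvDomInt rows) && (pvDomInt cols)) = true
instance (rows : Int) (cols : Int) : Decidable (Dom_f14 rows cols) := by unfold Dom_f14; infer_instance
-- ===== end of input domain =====

-- ===== PORT A =====
def f14 (rows : Int) (cols : Int) : List (List Int) :=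
  (PySem.List.pyRange 0 rows 1).foldl (fun returnValue row =>
    returnValue ++ [(PySem.List.pyRange 0 cols 1).foldl (fun adjact_value col =>
      let c0 : Int := 0
      let c1 := if row - 1 ≥ 0 then c0 + 1 else c0
      let c2 := if row + 1 < rows then c1 + 1 else c1
      let c3 := if col - 1 ≥ 0 then c2 + 1 else c2
      let c4 := if col + 1 < cols then c3 + 1 else c3
      adjact_value ++ [c4]) []]) []

-- ===== PORT B =====
-- B: two precomputed 1-D contribution tables combined by a separable sum (simpler decomposition).
def f14_alt (rows : Int) (cols : Int) : List (List Int) :=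
  if rows ≤ 0 then [] else
  let vert := (PySem.List.pyRange 0 rows 1).map (fun r =>
    (if r > 0 then (1:Int) else 0) + (if r < rows - 1 then 1 else 0))
  let horiz := (PySem.List.pyRange 0 cols 1).map (fun c =>
    (if c > 0 then (1:Int) else 0) + (if c < cols - 1 then 1 else 0))
  vert.map (fun v => horiz.map (fun h => v + h))

-- ===== PRECONDITION & SPEC =====
def Spec_f14 (rows : Int) (cols : Int) (out : List (List Int)) : Prop := out = f14_alt rows cols
instance (rows : Int) (cols : Int) (out : List (List Int)) : Decidable (Spec_f14 rows cols out) := by unfold Spec_f14; infer_instance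

-- ===== CLAIM (what is proved, stated in full; the proofs are below) =====
def Claim_equal_f14 : Prop := ∀ (rows : Int) (cols : Int), Dom_f14 rows cols → Spec_f14 rows cols (f14 rows cols)

-- ===== LEMMAS AND PROOFS =====

-- ===== VERDICT (by name: the statement is the Claim_ definition above) =====
theorem f14_spec : Claim_equal_f14 := by
  intro rows cols _
  unfold Spec_f14 f14 f14_alt
  by_cases h : rows ≤ 0
  · simp [h, PySem.List.pyRange, Int.toNat_of_nonpos h]
  · simp only [if_neg h, PySem.List.foldl_append_singleton_eq_map, List.map_map]
    refine List.map_congr_left (fun row _ => ?_)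
    refine List.map_congr_left (fun col _ => ?_)
    simp only [Function.comp]
    split_ifs <;> omega
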